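/- GENERATED by c/gen_decode.py: decode facts of the image, one per distinct instruction byte string. -/
import UserX.DecodeImage

#decode_all Toy.Dec
  "4829ea"  -- sub rdx,rbp
  "48890579cb0300"  -- mov QWORD PTR [rip+0x3cb79],rax
  "4901ed"  -- add r13,rbp
  "780a"  -- js 10518f
  "b808000000"  -- mov eax,0x8
  "c7830c00c000f3f3f3f3"  -- mov DWORD PTR [rbx+0xc0000c],0xf3f3f3f3
  "e8bcb0ffff"  -- call 100300
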